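-- pv_equiv track=rewrite | github.com/zyzo/izberg-api-python | icebergsdk/resources/application.py | filter_channels
-- ===== SOURCE A (Python) =====
-- def filter_channels(data, language, fallback, fallback_language):
--         res = []
--         fallback_channel = []
--         for channel in data['objects']:
--             if channel['language'] == language:
--                 res.append(channel)
--             elif fallback and channel['language'] == fallback_language:
--                 fallback_channel.append(channel)
--         return res if res else fallback_channel
-- ===== SOURCE B (Python) =====
-- def filter_channels(data, language, fallback, fallback_language):
--     pairs = [(channel['language'], channel) for channel in data['objects']]
--     groups = {}
--     for lang, channel in pairs:
--         groups[lang] = groups.get(lang, []) + [channel]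
--     res = groups.get(language, [])
--     if res:
--         return res
--     return groups.get(fallback_language, []) if fallback else []
-- ===== Notes on version B (the rewrite author's own statement) =====
-- stated objective: alternative
-- what changed: Replaces A's single interleaved loop with two accumulator lists by building a dictionary index grouping channels by language in one pass and then answering both the primary and the fallback query by dictionary lookup.
import Mathlib
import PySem

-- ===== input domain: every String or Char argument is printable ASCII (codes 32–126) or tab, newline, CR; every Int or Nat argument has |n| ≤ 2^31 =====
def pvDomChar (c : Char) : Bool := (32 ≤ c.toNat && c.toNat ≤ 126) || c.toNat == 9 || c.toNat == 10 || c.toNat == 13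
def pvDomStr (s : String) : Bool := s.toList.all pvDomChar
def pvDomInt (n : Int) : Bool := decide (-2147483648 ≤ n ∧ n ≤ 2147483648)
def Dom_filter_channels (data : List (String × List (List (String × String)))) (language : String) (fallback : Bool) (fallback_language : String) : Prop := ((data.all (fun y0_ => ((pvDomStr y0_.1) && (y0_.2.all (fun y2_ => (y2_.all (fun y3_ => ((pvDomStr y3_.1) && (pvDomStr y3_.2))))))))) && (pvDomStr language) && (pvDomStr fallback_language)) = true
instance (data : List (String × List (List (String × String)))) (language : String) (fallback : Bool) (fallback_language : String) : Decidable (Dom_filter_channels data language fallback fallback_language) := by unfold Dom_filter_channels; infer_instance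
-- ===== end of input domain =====

-- B replaces A's interleaved two-accumulator loop by a dictionary index grouping
-- channels by language, answered by lookup; equivalence of the return value.

-- channel['language'] (Pre_ guarantees the key exists; getD "" never fires inside Pre_)
def pvLang (c : List (String × String)) : String := (PySem.Dict.get? (PySem.Dict.mk c) "language").getD ""

-- ===== PORT A =====
def filter_channels (data : List (String × List (List (String × String)))) (language : String) (fallback : Bool) (fallback_language : String) : List (List (String × String)) :=
  let objs := (PySem.Dict.get? (PySem.Dict.mk data) "objects").getD []
  let st := objs.foldl (fun (st : List (List (String × String)) × List (List (String × String))) channel =>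
    if pvLang channel == language then (st.1 ++ [channel], st.2)
    else if fallback && (pvLang channel == fallback_language) then (st.1, st.2 ++ [channel])
    else st) ([], [])
  if st.1.isEmpty then st.2 else st.1

-- ===== PORT B =====
def filter_channels_alt (data : List (String × List (List (String × String)))) (language : String) (fallback : Bool) (fallback_language : String) : List (List (String × String)) :=
  let objs := (PySem.Dict.get? (PySem.Dict.mk data) "objects").getD []
  let pairs := objs.map (fun channel => (pvLang channel, channel))
  let groups := pairs.foldl (fun (d : PySem.Dict String (List (List (String × String)))) p =>
    d.modify p.1 [] (· ++ [p.2])) PySem.Dict.empty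
  let res := groups.getD language []
  if !res.isEmpty then res
  else if fallback then groups.getD fallback_language [] else []

-- ===== PRECONDITION & SPEC =====
-- A raises KeyError when data has no 'objects' key, or some channel in it has no
-- 'language' key; Pre_ excludes exactly those inputs.
def Pre_filter_channels (data : List (String × List (List (String × String)))) (language : String) (fallback : Bool) (fallback_language : String) : Prop :=
  (PySem.Dict.get? (PySem.Dict.mk data) "objects").isSome ∧
  ∀ c ∈ (PySem.Dict.get? (PySem.Dict.mk data) "objects").getD [], (PySem.Dict.get? (PySem.Dict.mk c) "language").isSome
instance (data : List (String × List (List (String × String)))) (language : String) (fallback : Bool) (fallback_language : String) : Decidable (Pre_filter_channels data language fallback fallback_language) := by unfold Pre_filter_channels; infer_instance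

def pvWitness_filter_channels : (List (String × List (List (String × String)))) × String × Bool × String :=
  ([("objects", [[("language", "en")], [("language", "fr")]])], "de", true, "fr")

def Spec_filter_channels (data : List (String × List (List (String × String)))) (language : String) (fallback : Bool) (fallback_language : String) (out : List (List (String × String))) : Prop := out = filter_channels_alt data language fallback fallback_language
instance (data : List (String × List (List (String × String)))) (language : String) (fallback : Bool) (fallback_language : String) (out : List (List (String × String))) : Decidable (Spec_filter_channels data language fallback fallback_language out) := by unfold Spec_filter_channels; infer_instance

-- ===== CLAIM (what is proved, stated in full; the proofs are below) =====
def Claim_equal_filter_channels : Prop := ∀ (data : List (String × List (List (String × String)))) (language : String) (fallback : Bool) (fallback_language : String), Dom_filter_channels data language fallback fallback_language → Pre_filter_channels data language fallback fallback_language → Spec_filter_channels data language fallback fallback_language (filter_channels data language fallback fallback_language)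

-- ===== LEMMAS AND PROOFS =====

-- the interleaved loop of A computes two language filters
theorem pvFold_eq (language fallback_language : String) (fallback : Bool)
    (objs : List (List (String × String)))
    (a b : List (List (String × String))) :
    objs.foldl (fun (st : List (List (String × String)) × List (List (String × String))) channel =>
      if pvLang channel == language then (st.1 ++ [channel], st.2)
      else if fallback && (pvLang channel == fallback_language) then (st.1, st.2 ++ [channel])
      else st) (a, b)
    = (a ++ objs.filter (fun c => pvLang c == language),
       b ++ objs.filter (fun c => !(pvLang c == language) && fallback && (pvLang c == fallback_language))) := by
  induction objs generalizing a b with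
  | nil => simp
  | cons c cs ih =>
    simp only [List.foldl_cons, List.filter_cons]
    by_cases h : (pvLang c == language) = true
    · rw [if_pos h, ih]
      simp [h]
    · simp only [Bool.not_eq_true] at h
      rw [if_neg (by simp [h])]
      by_cases h2 : (fallback && (pvLang c == fallback_language)) = true
      · rw [if_pos h2, ih]
        simp [h, h2]
      · rw [if_neg h2, ih]
        simp only [Bool.not_eq_true] at h2
        simp [h, h2]

-- B's language index answers a lookup by the corresponding language filter
theorem pvGroups_getD (objs : List (List (String × String))) (k : String) :
    (((objs.map (fun channel => (pvLang channel, channel))).foldl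
        (fun (d : PySem.Dict String (List (List (String × String)))) p =>
          d.modify p.1 [] (· ++ [p.2])) PySem.Dict.empty).getD k [])
    = objs.filter (fun c => pvLang c == k) := by
  rw [PySem.Dict.getD_foldl_modify_append]
  simp [List.filter_map, Function.comp_def]

theorem filter_channels_spec : Claim_equal_filter_channels := by
  intro data language fallback fallback_language _ _
  unfold Spec_filter_channels filter_channels filter_channels_alt
  simp only [pvFold_eq, pvGroups_getD, List.nil_append]
  set objs := (PySem.Dict.get? (PySem.Dict.mk data) "objects").getD [] with hobjs
  by_cases hres : (objs.filter (fun c => pvLang c == language)).isEmpty = true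
  · rw [List.isEmpty_iff] at hres
    simp only [hres, List.isEmpty_nil, if_true, Bool.not_true, Bool.false_eq_true, if_false]
    have hall : ∀ c ∈ objs, (pvLang c == language) = false := by
      intro c hc
      by_contra hne
      have : c ∈ objs.filter (fun c => pvLang c == language) := by
        simp only [Bool.not_eq_false] at hne
        simp [List.mem_filter, hc, hne]
      simp [hres] at this
    cases fallback with
    | false => simp
    | true =>
      rw [if_pos rfl]
      apply List.filter_congr
      intro c hc
      simp [hall c hc]
  · simp [hres]
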